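-- pv_equiv track=rewrite | github.com/jagatsingh/schema-gen | src/schema_gen/generators/rust_generator.py | _split_field_blocks
-- ===== SOURCE A (Python) =====
-- def _split_field_blocks(lines: list[str]) -> list[list[str]]:
--     """Split a flat list of field lines (with blank-line sentinels) into blocks."""
--     blocks: list[list[str]] = []
--     current: list[str] = []
--     for line in lines:
--         if line == "":
--             if current:
--                 blocks.append(current)
--                 current = []
--         else:
--             current.append(line)
--     if current:
--         blocks.append(current)
--     return blocks
-- ===== SOURCE B (Python) =====
-- from itertools import groupby
--
-- def _split_field_blocks(lines: list[str]) -> list[list[str]]: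
--     """Split a flat list of field lines (with blank-line sentinels) into blocks."""
--     return [list(run) for is_blank, run in groupby(lines, key=lambda l: l == "") if not is_blank]
-- ===== Notes on version B (the rewrite author's own statement) =====
-- stated objective: idiomatic
-- what changed: Replaces the explicit accumulator with flush-on-blank branching by itertools.groupby run-grouping that keeps only the non-blank runs.
import Mathlib
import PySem

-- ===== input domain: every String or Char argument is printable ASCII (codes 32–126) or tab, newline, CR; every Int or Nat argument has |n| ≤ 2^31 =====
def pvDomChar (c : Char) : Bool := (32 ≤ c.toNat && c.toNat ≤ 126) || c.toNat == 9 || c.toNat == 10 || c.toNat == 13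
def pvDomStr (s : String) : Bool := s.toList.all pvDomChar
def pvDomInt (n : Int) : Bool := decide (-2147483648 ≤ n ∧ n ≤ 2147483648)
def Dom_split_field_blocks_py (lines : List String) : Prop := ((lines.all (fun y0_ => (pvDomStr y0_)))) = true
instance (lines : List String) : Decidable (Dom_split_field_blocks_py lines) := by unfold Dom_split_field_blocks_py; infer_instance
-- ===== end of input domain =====

-- B replaces A's explicit accumulator + flush-on-blank branch by grouping consecutive runs (itertools.groupby) and keeping the non-blank runs; same return value, no speed claim.

-- ===== PORT A =====
-- A: fold over the lines maintaining (blocks, current), flushing current on a blank line, then a final flush.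
def split_field_blocks_py (lines : List String) : List (List String) :=
  let st := lines.foldl
    (fun (s : List (List String) × List String) line =>
      if line = "" then
        if s.2 ≠ [] then (s.1 ++ [s.2], []) else s
      else
        (s.1, s.2 ++ [line]))
    ([], [])
  if st.2 ≠ [] then st.1 ++ [st.2] else st.1

-- ===== PORT B =====
-- B: groupby on the key (line == ""): take each maximal run; keep runs of non-blank lines, drop runs of blanks.
def split_field_blocks_py_alt (lines : List String) : List (List String) :=
  match lines with
  | [] => []
  | l :: ls =>
    if l = "" then
      -- blank run: skipped entirely
      split_field_blocks_py_alt (ls.dropWhile (fun s => s == ""))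
    else
      -- non-blank run: kept as one block
      (l :: ls.takeWhile (fun s => s != "")) :: split_field_blocks_py_alt (ls.dropWhile (fun s => s != ""))
termination_by lines.length
decreasing_by
  · exact Nat.lt_succ_of_le (ls.length_dropWhile_le _)
  · exact Nat.lt_succ_of_le (ls.length_dropWhile_le _)

-- ===== PRECONDITION & SPEC =====
def Spec_split_field_blocks_py (lines : List String) (out : List (List String)) : Prop := out = split_field_blocks_py_alt lines
instance (lines : List String) (out : List (List String)) : Decidable (Spec_split_field_blocks_py lines out) := by unfold Spec_split_field_blocks_py; infer_instance

-- ===== CLAIM (what is proved, stated in full; the proofs are below) =====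
def Claim_equal_split_field_blocks_py : Prop := ∀ (lines : List String), Dom_split_field_blocks_py lines → Spec_split_field_blocks_py lines (split_field_blocks_py lines)

-- ===== LEMMAS AND PROOFS =====

-- reference recursion describing A's fold with pending block `current`
def pvGo (current : List String) : List String → List (List String)
  | [] => if current = [] then [] else [current]
  | l :: ls =>
    if l = "" then
      if current = [] then pvGo [] ls else current :: pvGo [] ls
    else pvGo (current ++ [l]) ls

lemma pvAlt_dropBlank (ls : List String) :
    split_field_blocks_py_alt (ls.dropWhile (fun s => s == "")) = split_field_blocks_py_alt ls := by
  induction ls with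
  | nil => rfl
  | cons h t ih =>
    by_cases hh : h = ""
    · subst hh
      rw [List.dropWhile_cons_of_pos (by simp)]
      rw [ih]
      rw [show split_field_blocks_py_alt ("" :: t)
            = split_field_blocks_py_alt (t.dropWhile (fun s => s == "")) from by
        rw [split_field_blocks_py_alt]; simp]
      rw [ih]
    · rw [List.dropWhile_cons_of_neg (by simp [hh])]

lemma pvGo_spec (lines : List String) :
    (pvGo [] lines = split_field_blocks_py_alt lines) ∧
    (∀ current, current ≠ [] →
      pvGo current lines
        = (current ++ lines.takeWhile (fun s => s != "")) ::
            split_field_blocks_py_alt (lines.dropWhile (fun s => s != ""))) := by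
  induction lines with
  | nil =>
    constructor
    · simp [pvGo, split_field_blocks_py_alt.eq_def]
    · intro current hc
      simp [pvGo, split_field_blocks_py_alt.eq_def, hc]
  | cons l ls ih =>
    constructor
    · by_cases hl : l = ""
      · subst hl
        rw [show pvGo [] ("" :: ls) = pvGo [] ls from by simp [pvGo]]
        rw [ih.1]
        rw [show split_field_blocks_py_alt ("" :: ls)
              = split_field_blocks_py_alt (ls.dropWhile (fun s => s == "")) from by
          rw [split_field_blocks_py_alt]; simp]
        rw [pvAlt_dropBlank]
      · rw [show pvGo [] (l :: ls) = pvGo ([] ++ [l]) ls from by simp [pvGo, hl]]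
        rw [List.nil_append, ih.2 [l] (by simp)]
        rw [show split_field_blocks_py_alt (l :: ls)
              = (l :: ls.takeWhile (fun s => s != "")) ::
                  split_field_blocks_py_alt (ls.dropWhile (fun s => s != "")) from by
          rw [split_field_blocks_py_alt]; simp [hl]]
        simp
    · intro current hc
      by_cases hl : l = ""
      · subst hl
        rw [show pvGo current ("" :: ls) = current :: pvGo [] ls from by simp [pvGo, hc]]
        rw [ih.1]
        rw [List.takeWhile_cons_of_neg (by simp), List.dropWhile_cons_of_neg (by simp)]
        rw [show split_field_blocks_py_alt ("" :: ls)
              = split_field_blocks_py_alt (ls.dropWhile (fun s => s == "")) from by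
          rw [split_field_blocks_py_alt]; simp]
        rw [pvAlt_dropBlank]
        simp
      · rw [show pvGo current (l :: ls) = pvGo (current ++ [l]) ls from by simp [pvGo, hl]]
        rw [ih.2 (current ++ [l]) (by simp)]
        rw [List.takeWhile_cons_of_pos (by simp [hl]), List.dropWhile_cons_of_pos (by simp [hl])]
        simp

lemma pvFold_go (lines : List String) : ∀ (blocks : List (List String)) (current : List String),
    (let st := lines.foldl
        (fun (s : List (List String) × List String) line =>
          if line = "" then
            if s.2 ≠ [] then (s.1 ++ [s.2], []) else s
          else
            (s.1, s.2 ++ [line]))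
        (blocks, current)
     if st.2 ≠ [] then st.1 ++ [st.2] else st.1)
      = blocks ++ pvGo current lines := by
  induction lines with
  | nil =>
    intro blocks current
    by_cases hc : current = [] <;> simp [pvGo, hc]
  | cons l ls ih =>
    intro blocks current
    by_cases hl : l = ""
    · subst hl
      by_cases hc : current = []
      · subst hc
        simpa [pvGo] using ih blocks []
      · rw [List.foldl_cons]
        rw [show (if ("":String) = "" then
              if (blocks, current).2 ≠ [] then ((blocks, current).1 ++ [(blocks, current).2], ([] : List String))
              else (blocks, current)
            else ((blocks, current).1, (blocks, current).2 ++ [""])) = (blocks ++ [current], []) from by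
          simp [hc]]
        rw [ih (blocks ++ [current]) []]
        simp [pvGo, hc]
    · rw [List.foldl_cons]
      rw [show (if l = "" then
            if (blocks, current).2 ≠ [] then ((blocks, current).1 ++ [(blocks, current).2], ([] : List String))
            else (blocks, current)
          else ((blocks, current).1, (blocks, current).2 ++ [l])) = (blocks, current ++ [l]) from by
        simp [hl]]
      rw [ih blocks (current ++ [l])]
      simp [pvGo, hl]

-- ===== VERDICT (by name: the statement is the Claim_ definition above) =====
theorem split_field_blocks_py_spec : Claim_equal_split_field_blocks_py := by
  intro lines _
  unfold Spec_split_field_blocks_py split_field_blocks_py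
  rw [pvFold_go lines [] []]
  simp [(pvGo_spec lines).1]
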